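-- pv_equiv track=rewrite | github.com/segadevelop/Python | GUI_Scripts/Templates/cryptography.py | rotors
-- ===== SOURCE A (Python) =====
-- def rotors(mode, message, final = ""):
--     message = message.upper()
--     rotors = (
--         (10,24,14,12,23,2,7,15,24,2,7,5,22,6,2,1,22,12,6,9,7,2,11,23,14,2),
--         (1,7,11,26,12,5,11,20,11,7,18,6,17,18,19,1,13,5,2,9,11,13,6,17,26,24),
--         (9,1,21,6,4,19,25,6,17,10,26,1,23,6,1,17,19,17,25,21,3,21,17,1,18,20)
--     )
--     x,y,z = 1,2,3
--     for symbol in message: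
--         rotor = rotors[0][x] + rotors[1][y] + rotors[2][z]
--         if mode == 'E':
--             if symbol in [chr(x) for x in range(65,91)]:
--                 final += chr((ord(symbol) - 13 + rotor)%26 + ord('A'))
--             else: continue
--         else:
--             final += chr((ord(symbol) - 13 - rotor)%26 + ord('A'))
--         if x != 25: x += 1
--         else:
--             x = 0
--             if y != 25: y += 1
--             else:
--                 y = 0
--                 if z != 25: z += 1
--                 else: z = 0
--     return final
-- ===== SOURCE B (Python) =====
-- def rotors(mode, message, final=""):
--     R0 = (10,24,14,12,23,2,7,15,24,2,7,5,22,6,2,1,22,12,6,9,7,2,11,23,14,2)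
--     R1 = (1,7,11,26,12,5,11,20,11,7,18,6,17,18,19,1,13,5,2,9,11,13,6,17,26,24)
--     R2 = (9,1,21,6,4,19,25,6,17,10,26,1,23,6,1,17,19,17,25,21,3,21,17,1,18,20)
--     msg = message.upper()
--     if mode == 'E':
--         chars = [c for c in msg if 'A' <= c <= 'Z']
--         sign = 1
--     else:
--         chars = msg
--         sign = -1
--     out = []
--     for n, c in enumerate(chars):
--         k = n + 1
--         q = 2 + k // 26
--         rotor = R0[k % 26] + R1[q % 26] + R2[(3 + q // 26) % 26]
--         out.append(chr((ord(c) - 13 + sign * rotor) % 26 + 65))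
--     return final + ''.join(out)
-- ===== Notes on version B (the rewrite author's own statement) =====
-- stated objective: simpler
-- what changed: Replaces A's three mutable odometer registers with carry branches by a single filter-then-enumerate pass that derives each rotor position from the emission counter with a divmod closed form.
import Mathlib
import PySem

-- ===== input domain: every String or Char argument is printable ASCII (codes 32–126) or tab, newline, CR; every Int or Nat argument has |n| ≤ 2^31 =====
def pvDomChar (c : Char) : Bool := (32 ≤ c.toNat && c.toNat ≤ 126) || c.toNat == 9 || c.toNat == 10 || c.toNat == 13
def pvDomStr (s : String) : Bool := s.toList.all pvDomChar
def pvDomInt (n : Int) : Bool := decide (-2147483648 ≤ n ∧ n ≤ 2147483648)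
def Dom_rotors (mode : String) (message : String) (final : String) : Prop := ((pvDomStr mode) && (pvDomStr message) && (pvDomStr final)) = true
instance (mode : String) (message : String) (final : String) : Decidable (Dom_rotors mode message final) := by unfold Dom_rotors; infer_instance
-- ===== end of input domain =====

-- B replaces A's three nested odometer registers with one enumerate pass using a divmod
-- closed form for the rotor positions (objective: simpler).

-- ===== PORT A =====
-- the three rotor tables (the tuples both Pythons define)
def pvR0 : List Int := [10,24,14,12,23,2,7,15,24,2,7,5,22,6,2,1,22,12,6,9,7,2,11,23,14,2]
def pvR1 : List Int := [1,7,11,26,12,5,11,20,11,7,18,6,17,18,19,1,13,5,2,9,11,13,6,17,26,24]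
def pvR2 : List Int := [9,1,21,6,4,19,25,6,17,10,26,1,23,6,1,17,19,17,25,21,3,21,17,1,18,20]

-- body of A's for-loop: state (x, y, z, final)
def rotorsLoop (mode : String) (s : Int × Int × Int × List Char) (symbol : Char) :
    Int × Int × Int × List Char :=
  let x := s.1; let y := s.2.1; let z := s.2.2.1; let fin := s.2.2.2
  let rotor := PySem.List.pyGetD pvR0 x 0 + PySem.List.pyGetD pvR1 y 0 + PySem.List.pyGetD pvR2 z 0
  if mode == "E" then
    if symbol ∈ (PySem.List.pyRange 65 91 1).map (fun i => Char.ofNat i.toNat) then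
      let fin := fin ++ [Char.ofNat ((PySem.Int.mod ((symbol.toNat : Int) - 13 + rotor) 26).toNat + 65)]
      if x ≠ 25 then (x + 1, y, z, fin)
      else if y ≠ 25 then (0, y + 1, z, fin)
      else if z ≠ 25 then (0, 0, z + 1, fin)
      else (0, 0, 0, fin)
    else s      -- continue: positions do not advance
  else
    let fin := fin ++ [Char.ofNat ((PySem.Int.mod ((symbol.toNat : Int) - 13 - rotor) 26).toNat + 65)]
    if x ≠ 25 then (x + 1, y, z, fin)
    else if y ≠ 25 then (0, y + 1, z, fin)
    else if z ≠ 25 then (0, 0, z + 1, fin)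
    else (0, 0, 0, fin)

def rotors (mode : String) (message : String) (final : String) : String :=
  let msg := PySem.Str.upper message
  let st := msg.toList.foldl (rotorsLoop mode) (1, 2, 3, final.toList)
  String.ofList st.2.2.2

-- ===== PORT B =====
def pvIsUp (c : Char) : Bool := decide ('A' ≤ c ∧ c ≤ 'Z')

-- body of B's enumerate-map: encode the n-th emitted character
def rotorsEnc (sign : Int) (nc : Int × Char) : Char :=
  let k := nc.1 + 1
  let q := 2 + PySem.Int.floordiv k 26
  let rotor := PySem.List.pyGetD pvR0 (PySem.Int.mod k 26) 0
             + PySem.List.pyGetD pvR1 (PySem.Int.mod q 26) 0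
             + PySem.List.pyGetD pvR2 (PySem.Int.mod (3 + PySem.Int.floordiv q 26) 26) 0
  Char.ofNat ((PySem.Int.mod ((nc.2.toNat : Int) - 13 + sign * rotor) 26).toNat + 65)

def rotors_alt (mode : String) (message : String) (final : String) : String :=
  let msg := PySem.Str.upper message
  let cs := if mode == "E" then msg.toList.filter pvIsUp else msg.toList
  let sign : Int := if mode == "E" then 1 else -1
  let out := (PySem.List.enumerate cs 0).map (rotorsEnc sign)
  String.ofList (final.toList ++ out)

-- ===== PRECONDITION & SPEC =====
def Spec_rotors (mode : String) (message : String) (final : String) (out : String) : Prop := out = rotors_alt mode message final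
instance (mode : String) (message : String) (final : String) (out : String) : Decidable (Spec_rotors mode message final out) := by unfold Spec_rotors; infer_instance

-- ===== CLAIM (what is proved, stated in full; the proofs are below) =====
def Claim_equal_rotors : Prop := ∀ (mode : String) (message : String) (final : String), Dom_rotors mode message final → Spec_rotors mode message final (rotors mode message final)

-- ===== LEMMAS AND PROOFS =====

-- closed-form rotor positions after n emitted characters
def pX (n : Int) : Int := (1 + n) % 26
def pY (n : Int) : Int := (2 + (1 + n) / 26) % 26
def pZ (n : Int) : Int := (3 + (2 + (1 + n) / 26) / 26) % 26

lemma pvIsUp_iff (c : Char) : pvIsUp c = true ↔ 65 ≤ c.toNat ∧ c.toNat ≤ 90 := by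
  rw [pvIsUp]
  simp only [decide_eq_true_eq, Char.le_def, UInt32.le_iff_toNat_le]
  constructor <;> intro h <;> exact h

lemma mem_upper (c : Char) :
    (c ∈ (PySem.List.pyRange 65 91 1).map (fun i => Char.ofNat i.toNat)) ↔ pvIsUp c = true := by
  rw [pvIsUp_iff, List.mem_map]
  constructor
  · rintro ⟨i, hi, rfl⟩
    rw [PySem.List.mem_pyRange_one] at hi
    have hv : (Char.ofNat i.toNat).toNat = i.toNat := by
      rw [Char.toNat_ofNat]
      have : i.toNat.isValidChar := by constructor; omega
      simp [this]
    omega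
  · rintro ⟨h1, h2⟩
    refine ⟨(c.toNat : Int), ?_, ?_⟩
    · rw [PySem.List.mem_pyRange_one]; omega
    · simp [Char.ofNat_toNat]

lemma idx_eq (n : Int) :
    PySem.Int.mod (n+1) 26 = pX n ∧
    PySem.Int.mod (2 + PySem.Int.floordiv (n+1) 26) 26 = pY n ∧
    PySem.Int.mod (3 + PySem.Int.floordiv (2 + PySem.Int.floordiv (n+1) 26) 26) 26 = pZ n := by
  rw [PySem.Int.floordiv_eq_ediv_of_pos (by norm_num), PySem.Int.floordiv_eq_ediv_of_pos (by norm_num)]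
  rw [PySem.Int.mod_eq_emod_of_pos (by norm_num), PySem.Int.mod_eq_emod_of_pos (by norm_num), PySem.Int.mod_eq_emod_of_pos (by norm_num)]
  unfold pX pY pZ
  refine ⟨by omega, by omega, by omega⟩

lemma encE_eq (n : Int) (c : Char) :
    rotorsEnc 1 (n, c) =
      Char.ofNat ((PySem.Int.mod ((c.toNat : Int) - 13 +
        (PySem.List.pyGetD pvR0 (pX n) 0 + PySem.List.pyGetD pvR1 (pY n) 0 +
         PySem.List.pyGetD pvR2 (pZ n) 0)) 26).toNat + 65) := by
  obtain ⟨h1, h2, h3⟩ := idx_eq n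
  simp only [rotorsEnc, h1, h2, h3, one_mul]

lemma encD_eq (n : Int) (c : Char) :
    rotorsEnc (-1) (n, c) =
      Char.ofNat ((PySem.Int.mod ((c.toNat : Int) - 13 -
        (PySem.List.pyGetD pvR0 (pX n) 0 + PySem.List.pyGetD pvR1 (pY n) 0 +
         PySem.List.pyGetD pvR2 (pZ n) 0)) 26).toNat + 65) := by
  obtain ⟨h1, h2, h3⟩ := idx_eq n
  simp only [rotorsEnc, h1, h2, h3, neg_one_mul, ← sub_eq_add_neg]

lemma adv_eq (n : Int) (fin : List Char) :
    (if pX n ≠ 25 then (pX n + 1, pY n, pZ n, fin)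
     else if pY n ≠ 25 then ((0:Int), pY n + 1, pZ n, fin)
     else if pZ n ≠ 25 then ((0:Int), (0:Int), pZ n + 1, fin)
     else ((0:Int), (0:Int), (0:Int), fin)) = (pX (n+1), pY (n+1), pZ (n+1), fin) := by
  simp only [pX, pY, pZ]
  split_ifs with h1 h2 h3 <;> simp_all <;> (try constructor) <;> (try constructor)
  all_goals omega

lemma loopE (cs : List Char) : ∀ (n : Int) (fin : List Char),
    cs.foldl (rotorsLoop "E") (pX n, pY n, pZ n, fin) =
      (pX (n + (cs.filter pvIsUp).length), pY (n + (cs.filter pvIsUp).length),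
       pZ (n + (cs.filter pvIsUp).length),
       fin ++ (PySem.List.enumerate (cs.filter pvIsUp) n).map (rotorsEnc 1)) := by
  induction cs with
  | nil => intro n fin; simp [PySem.List.enumerate_nil]
  | cons c cs ih =>
    intro n fin
    by_cases hc : pvIsUp c = true
    · have hstep : rotorsLoop "E" (pX n, pY n, pZ n, fin) c =
          (pX (n+1), pY (n+1), pZ (n+1), fin ++ [rotorsEnc 1 (n, c)]) := by
        rw [rotorsLoop]
        simp only [beq_self_eq_true, if_true, (mem_upper c).mpr hc, encE_eq n c]
        exact adv_eq n _
      have hfil : List.filter pvIsUp (c :: cs) = c :: cs.filter pvIsUp := by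
        simp [hc]
      rw [List.foldl_cons, hstep, ih (n+1), hfil,
          PySem.List.enumerate_cons, List.map_cons]
      have e1 : n + 1 + ((cs.filter pvIsUp).length : Int) = n + (((cs.filter pvIsUp).length : Int) + 1) := by omega
      rw [e1]
      simp
    · have hstep : rotorsLoop "E" (pX n, pY n, pZ n, fin) c = (pX n, pY n, pZ n, fin) := by
        rw [rotorsLoop]
        simp only [beq_self_eq_true, if_true]
        rw [if_neg]
        rw [mem_upper c]
        simp [hc]
      have hfil : List.filter pvIsUp (c :: cs) = cs.filter pvIsUp := by
        simp [hc]
      rw [List.foldl_cons, hstep, ih n, hfil]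

lemma loopD (mode : String) (hm : (mode == "E") = false) (cs : List Char) :
    ∀ (n : Int) (fin : List Char),
    cs.foldl (rotorsLoop mode) (pX n, pY n, pZ n, fin) =
      (pX (n + cs.length), pY (n + cs.length), pZ (n + cs.length),
       fin ++ (PySem.List.enumerate cs n).map (rotorsEnc (-1))) := by
  induction cs with
  | nil => intro n fin; simp [PySem.List.enumerate_nil]
  | cons c cs ih =>
    intro n fin
    have hstep : rotorsLoop mode (pX n, pY n, pZ n, fin) c =
        (pX (n+1), pY (n+1), pZ (n+1), fin ++ [rotorsEnc (-1) (n, c)]) := by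
      rw [rotorsLoop]
      simp only [hm, encD_eq n c]
      exact adv_eq n _
    rw [List.foldl_cons, hstep, ih (n+1), PySem.List.enumerate_cons, List.map_cons]
    have e1 : n + 1 + (cs.length : Int) = n + ((cs.length : Int) + 1) := by omega
    rw [e1]
    simp

-- ===== VERDICT (by name: the statement is the Claim_ definition above) =====
theorem rotors_spec : Claim_equal_rotors := by
  intro mode message final _
  unfold Spec_rotors rotors rotors_alt
  by_cases hm : (mode == "E") = true
  · have hmode : mode = "E" := by simpa using hm
    subst hmode
    have h0 : ((1:Int), (2:Int), (3:Int), final.toList) = (pX 0, pY 0, pZ 0, final.toList) := by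
      simp [pX, pY, pZ]
    simp only [h0, loopE _ 0 final.toList]
    simp
  · have hm' : (mode == "E") = false := by simpa using hm
    have h0 : ((1:Int), (2:Int), (3:Int), final.toList) = (pX 0, pY 0, pZ 0, final.toList) := by
      simp [pX, pY, pZ]
    simp only [h0, loopD mode hm' _ 0 final.toList]
    simp [hm']
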